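-- pv_equiv track=rewrite | github.com/vpershko07/t2-project | gen_email.py | rot5_encode
-- ===== SOURCE A (Python) =====
-- def rot5_encode(string):
--     encoded_string = ""
--     for char in string:
--         if char.isdigit():
--             encoded_string += chr((ord(char) - ord('0') + 5) % 10 + ord('0'))
--         else:
--             encoded_string += char
--     return encoded_string
-- ===== SOURCE B (Python) =====
-- _MAP = {"0": "5", "1": "6", "2": "7", "3": "8", "4": "9",
--         "5": "0", "6": "1", "7": "2", "8": "3", "9": "4"}
--
--
-- def rot5_encode(string):
--     # Divide and conquer: split the string in half, encode each half
--     # recursively, and concatenate; a string of length < 2 is encoded by a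
--     # direct table lookup (non-digits map to themselves).
--     if len(string) < 2:
--         return _MAP.get(string, string)
--     mid = len(string) // 2
--     return rot5_encode(string[:mid]) + rot5_encode(string[mid:])
-- ===== Notes on version B (the rewrite author's own statement) =====
-- stated objective: alternative
-- what changed: Replaces A's single left-to-right accumulator loop with per-character ord/chr arithmetic by a divide-and-conquer recursion that splits the string in half, encodes each half recursively and concatenates, with a dict lookup handling the length-<2 base case.
import Mathlib
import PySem

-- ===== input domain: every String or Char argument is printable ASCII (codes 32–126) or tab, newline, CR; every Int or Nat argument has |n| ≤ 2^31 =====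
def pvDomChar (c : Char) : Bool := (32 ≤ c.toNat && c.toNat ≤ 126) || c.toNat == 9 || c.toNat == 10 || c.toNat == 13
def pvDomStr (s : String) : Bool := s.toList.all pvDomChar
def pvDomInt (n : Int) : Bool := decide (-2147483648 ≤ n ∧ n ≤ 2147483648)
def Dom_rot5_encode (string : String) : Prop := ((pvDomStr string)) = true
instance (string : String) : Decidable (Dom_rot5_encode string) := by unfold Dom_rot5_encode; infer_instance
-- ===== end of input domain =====

-- B replaces A's accumulator loop with per-character arithmetic by a divide-and-conquer
-- recursion (halve, encode each half, concatenate) with a dict-lookup base case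
-- (objective: alternative structure, same result; not claimed faster).

-- ===== PORT A =====
-- loop body of A: append the ROT5 image of a digit, any other char unchanged
def rot5_step (acc : String) (c : Char) : String :=
  if PySem.Chars.isdigit c then
    acc.push (Char.ofNat (PySem.Int.mod ((c.toNat : Int) - ('0'.toNat : Int) + 5) 10 + ('0'.toNat : Int)).toNat)
  else acc.push c

def rot5_encode (string : String) : String :=
  string.toList.foldl rot5_step ""

-- ===== PORT B =====
-- the literal dict _MAP of Source B
def rot5_map : PySem.Dict String String :=
  PySem.Dict.mk [("0","5"),("1","6"),("2","7"),("3","8"),("4","9"),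
                 ("5","0"),("6","1"),("7","2"),("8","3"),("9","4")]

-- Source B's recursion; string[:mid] / string[mid:] with 0 ≤ mid ≤ len are exactly take/drop
def rot5_encode_alt (string : String) : String :=
  if h : string.length < 2 then rot5_map.getD string string
  else
    let mid := string.length / 2
    rot5_encode_alt (String.ofList (string.toList.take mid)) ++
      rot5_encode_alt (String.ofList (string.toList.drop mid))
termination_by string.length
decreasing_by
  · simp only [String.length_ofList, List.length_take, String.length_toList]
    omega
  · simp only [String.length_ofList, List.length_drop, String.length_toList]
    omega

-- ===== PRECONDITION & SPEC =====
def Spec_rot5_encode (string : String) (out : String) : Prop := out = rot5_encode_alt string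
instance (string : String) (out : String) : Decidable (Spec_rot5_encode string out) := by unfold Spec_rot5_encode; infer_instance

-- ===== CLAIM (what is proved, stated in full; the proofs are below) =====
def Claim_equal_rot5_encode : Prop := ∀ (string : String), Dom_rot5_encode string → Spec_rot5_encode string (rot5_encode string)

-- ===== LEMMAS AND PROOFS =====

-- the per-character image both programs compute
def rot5_char (c : Char) : Char :=
  if PySem.Chars.isdigit c then
    Char.ofNat (PySem.Int.mod ((c.toNat : Int) - ('0'.toNat : Int) + 5) 10 + ('0'.toNat : Int)).toNat
  else c

-- B's base-case dict lookup on a one-character string computes rot5_char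
lemma rot5_map_getD_single (c : Char) :
    rot5_map.getD (String.ofList [c]) (String.ofList [c]) = String.ofList [rot5_char c] := by
  by_cases hd : PySem.Chars.isdigit c = true
  · have hb : ('0' : Char) ≤ c ∧ c ≤ '9' := by simpa [PySem.Chars.isdigit] using hd
    have h1 : 48 ≤ c.toNat := by
      have := hb.1; rw [Char.le_def, UInt32.le_iff_toNat_le] at this; simpa using this
    have h2 : c.toNat ≤ 57 := by
      have := hb.2; rw [Char.le_def, UInt32.le_iff_toNat_le] at this; simpa using this
    have hofn : Char.ofNat c.toNat = c := Char.ofNat_toNat c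
    interval_cases h : c.toNat <;> (rw [← hofn]; decide)
  · simp only [Bool.not_eq_true] at hd
    have hne : rot5_char c = c := by simp [rot5_char, hd]
    rw [hne]
    simp only [rot5_map, PySem.Dict.getD, PySem.Dict.get?_mk_cons]
    split_ifs <;>
      first
        | rfl
        | (rename_i h
           have hc : (String.ofList [c]).toList = _ :=
             congrArg String.toList (eq_of_beq h).symm
           rw [String.toList_ofList] at hc
           have hdh : PySem.Chars.isdigit [c].headI = false := hd
           rw [hc] at hdh
           exact absurd hdh (by decide))

-- A's loop appends rot5_char of each character to the accumulator
lemma rot5_fold_toList (l : List Char) : ∀ (acc : String),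
    (l.foldl rot5_step acc).toList = acc.toList ++ l.map rot5_char := by
  induction l with
  | nil => intro acc; simp
  | cons c l ih =>
    intro acc
    rw [List.foldl_cons, ih]
    have hstep : (rot5_step acc c).toList = acc.toList ++ [rot5_char c] := by
      unfold rot5_step rot5_char; split <;> simp
    rw [hstep]; simp

-- B's divide-and-conquer computes the map of rot5_char (strong induction on length)
lemma rot5_alt_toList (s : String) :
    (rot5_encode_alt s).toList = s.toList.map rot5_char := by
  induction hn : s.length using Nat.strong_induction_on generalizing s with
  | _ n ih =>
  unfold rot5_encode_alt
  split
  · rename_i h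
    rcases hls : s.toList with _ | ⟨c, _ | ⟨c', rest⟩⟩
    · have hse : s = "" := by rw [← String.ofList_toList (s := s), hls]
      rw [hse]; decide
    · have hse : s = String.ofList [c] := by rw [← String.ofList_toList (s := s), hls]
      rw [hse, rot5_map_getD_single]
      simp [String.toList_ofList]
    · exfalso
      rw [← String.length_toList, hls] at h
      simp at h
  · rename_i h
    simp only [String.toList_append]
    rw [ih (String.ofList (s.toList.take (s.length / 2))).length
          (by simp only [String.length_ofList, List.length_take, String.length_toList]; omega)
          _ rfl,
        ih (String.ofList (s.toList.drop (s.length / 2))).length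
          (by simp only [String.length_ofList, List.length_drop, String.length_toList]; omega)
          _ rfl]
    simp only [String.toList_ofList, ← List.map_append, List.take_append_drop]

-- ===== VERDICT (by name: the statement is the Claim_ definition above) =====
theorem rot5_encode_spec : Claim_equal_rot5_encode := by
  intro s _
  unfold Spec_rot5_encode rot5_encode
  apply String.toList_injective
  rw [rot5_fold_toList, rot5_alt_toList]
  simp
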